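-- pv_equiv track=rewrite | github.com/SamGou/wordleart | helpers/WordSearch.py | letter_pos_combinations_orange
-- ===== SOURCE A (Python) =====
-- import copy
--
-- def letter_pos_combinations_orange(orange_pos,letter_pos,counter):
--     """Generate all possible combinations of letters in the specified positions
--     Takes green positions into account and actively keeps track of letters left to use (words with multiple letters)
--
--     Args:
--         orange_pos (_type_): _Static_ Positions of orange blocks -> [1,3] -> positions 1 & 3
--         letter_pos (_type_): _Static_ List of letters and their positions
--         counter (_type_): _Dynamic_ Dict of letters and their counts
--
--     Returns:
--         List: "RM" means _"R"_ in `orange_pos[0]` and _"M"_ in `orange_pos[1]`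
--     """
--     result = []
--     MAX_DEPTH = len(orange_pos) # max depth will be equal to the amount of orange letters we want to find
--     ORANGE_POS_MAP = {depth:orange_pos for depth,orange_pos in zip(range(MAX_DEPTH),orange_pos)} # Avaialble letters are depth dependent
--
--     def _build_tree(path, depth, max_depth,counter,letter_pos,orange_pos_map):
--         if depth == max_depth:
--             result.append(''.join(path))
--             return
--
--         green_letter = letter_pos[orange_pos_map[depth]][0]
--         for letter in {letter:i for letter,i in counter.items() if i > 0}:
--             if letter == green_letter:
--                 continue
--             temp_counter = copy.copy(counter)
--             temp_counter[letter] -= 1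
--             temp_counter = {letter:i for letter,i in temp_counter.items() if i > 0}
--             _build_tree(path + [letter], depth + 1, max_depth,temp_counter,letter_pos,orange_pos_map)
--
--     _build_tree(
--         path=[],
--         depth = 0,
--         max_depth = MAX_DEPTH,
--         counter=counter,
--         letter_pos=letter_pos,
--         orange_pos_map=ORANGE_POS_MAP
--         )
--
--     return set(result)
-- ===== SOURCE B (Python) =====
-- def letter_pos_combinations_orange(orange_pos, letter_pos, counter):
--     """Iterative breadth-first enumeration: a worklist of (path, counter) states is
--     expanded one orange position at a time; the caller's counter is never mutated."""
--     states = [([], dict(counter))]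
--     for pos in orange_pos:
--         if not states:
--             break
--         green = letter_pos[pos][0]
--         new_states = []
--         for path, cnt in states:
--             for letter, n in cnt.items():
--                 if n > 0 and letter != green:
--                     nc = dict(cnt)
--                     nc[letter] = n - 1
--                     new_states.append((path + [letter], nc))
--         states = new_states
--     return {''.join(path) for path, _ in states}
-- ===== Notes on version B (the rewrite author's own statement) =====
-- stated objective: alternative
-- what changed: Replaced A's recursive closure-based depth-first tree build (with a depth->position map and per-call dict-comprehension refiltering) by an iterative breadth-first worklist: one flat list of (path, counter) states expanded level by level per orange position, with an early break when the worklist empties.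
import Mathlib
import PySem

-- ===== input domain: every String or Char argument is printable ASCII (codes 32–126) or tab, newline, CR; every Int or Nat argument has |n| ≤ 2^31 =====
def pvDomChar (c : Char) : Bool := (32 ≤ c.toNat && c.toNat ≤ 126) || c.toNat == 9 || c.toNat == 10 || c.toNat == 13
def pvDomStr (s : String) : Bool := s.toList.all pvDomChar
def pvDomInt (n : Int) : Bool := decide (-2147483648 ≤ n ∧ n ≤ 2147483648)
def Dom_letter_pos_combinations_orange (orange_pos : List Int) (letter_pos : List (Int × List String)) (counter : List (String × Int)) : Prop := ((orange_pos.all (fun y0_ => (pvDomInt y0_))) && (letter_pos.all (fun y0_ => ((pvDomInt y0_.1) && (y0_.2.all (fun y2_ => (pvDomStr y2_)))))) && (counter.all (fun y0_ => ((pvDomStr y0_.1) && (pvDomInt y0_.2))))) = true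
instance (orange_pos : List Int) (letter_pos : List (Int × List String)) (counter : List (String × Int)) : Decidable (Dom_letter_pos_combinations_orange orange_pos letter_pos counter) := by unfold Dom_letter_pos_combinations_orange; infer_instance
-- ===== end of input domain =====

-- B replaces A's recursive tree build with an iterative breadth-first worklist expansion
-- over the orange positions (objective: alternative decomposition, same asymptotic cost).

-- ===== PORT A =====
-- ORANGE_POS_MAP = {depth: pos for depth, pos in zip(range(MAX_DEPTH), orange_pos)}
def pvOpm (orange_pos : List Int) : PySem.Dict Int Int :=
  PySem.Dict.mk (((List.range orange_pos.length).map (fun n => (n : Int))).zip orange_pos)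

-- _build_tree: the nested recursive helper; result accumulation becomes the returned list
-- (appends happen in the same order).  Dict lookups that would raise in Python get a
-- sentinel here; Pre_ excludes exactly those inputs (the sentinel is never consulted inside Pre_).
def pvBuildTree (letter_pos : PySem.Dict Int (List String)) (opm : PySem.Dict Int Int)
    (maxd : Nat) (path : List String) (depth : Nat) (cnt : PySem.Dict String Int) : List String :=
  if _hstop : depth = maxd then [PySem.Str.join "" path]
  else if _hover : maxd < depth then []  -- totalization guard only; unreachable (depth walks 0,1,…,maxd)
  else
    let green := ((letter_pos.get? ((opm.get? ((depth : Nat) : Int)).getD 0)).getD []).headD ""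
    ((cnt.items.filter (fun p => decide (0 < p.2))).flatMap (fun p =>
      if p.1 = green then []
      else
        pvBuildTree letter_pos opm maxd (path ++ [p.1]) (depth + 1)
          (PySem.Dict.mk (((cnt.modify p.1 0 (· - 1)).items).filter (fun q => decide (0 < q.2)))))
    )
termination_by maxd - depth
decreasing_by omega

def letter_pos_combinations_orange (orange_pos : List Int) (letter_pos : List (Int × List String)) (counter : List (String × Int)) : List String :=
  PySem.Set.ofList
    (pvBuildTree (PySem.Dict.mk letter_pos) (pvOpm orange_pos) orange_pos.length [] 0
      (PySem.Dict.mk counter))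

-- ===== PORT B =====
-- one BFS level: expand every worklist state by every positive, non-green letter
def pvStepB (green : String) (states : List (List String × PySem.Dict String Int)) :
    List (List String × PySem.Dict String Int) :=
  states.flatMap (fun st =>
    st.2.items.flatMap (fun p =>
      if 0 < p.2 ∧ p.1 ≠ green then [(st.1 ++ [p.1], st.2.insert p.1 (p.2 - 1))] else []))

-- for pos in orange_pos: if not states: break; …
def pvLoopB (letter_pos : PySem.Dict Int (List String)) :
    List Int → List (List String × PySem.Dict String Int) → List (List String × PySem.Dict String Int)
  | [], states => states
  | pos :: rest, states =>
    if states.isEmpty then states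
    else pvLoopB letter_pos rest (pvStepB (((letter_pos.get? pos).getD []).headD "") states)

def letter_pos_combinations_orange_alt (orange_pos : List Int) (letter_pos : List (Int × List String)) (counter : List (String × Int)) : List String :=
  PySem.Set.ofList
    ((pvLoopB (PySem.Dict.mk letter_pos) orange_pos [([], PySem.Dict.mk counter)]).map
      (fun st => PySem.Str.join "" st.1))

-- ===== PRECONDITION & SPEC =====
-- Helpers for Pre_ (plain list arithmetic; independent of both ports):
-- first letter_pos entry for a position, first letter of it ("" when absent/empty)
def pvGreenL (letter_pos : List (Int × List String)) (pos : Int) : String :=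
  (((letter_pos.find? (fun q => q.1 == pos)).map Prod.snd).getD []).headD ""
-- position has no usable green entry: Python's letter_pos[pos][0] would raise there
def pvInvalidL (letter_pos : List (Int × List String)) (pos : Int) : Prop :=
  ∀ q ∈ letter_pos, q.1 = pos → q.2 = []
-- total positive count mass of the counter
def pvSumPos (counter : List (String × Int)) : Int :=
  ((counter.filter (fun p => decide (0 < p.2))).map Prod.snd).sum
-- positive count of one letter (0 when absent or non-positive)
def pvCntL (counter : List (String × Int)) (l : String) : Int :=
  (((counter.filter (fun p => decide (0 < p.2))).find? (fun p => p.1 == l)).map Prod.snd).getD 0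
-- Hall condition: depth d of the search tree is reachable, i.e. some sequence of d letters can be
-- drawn from the counter avoiding the green letter of each earlier depth
def pvReachL (orange_pos : List Int) (letter_pos : List (Int × List String)) (counter : List (String × Int)) (d : Nat) : Prop :=
  (d : Int) ≤ pvSumPos counter ∧
  ∀ l ∈ ((orange_pos.take d).map (pvGreenL letter_pos)),
    ((((orange_pos.take d).map (pvGreenL letter_pos)).count l : Int)) ≤ pvSumPos counter - pvCntL counter l

-- Pre_ excludes (a) association lists with duplicate keys, which a Python dict argument can never
-- present (duplicate-key corner), and (b) EXACTLY the inputs on which Python A raises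
-- (KeyError/IndexError on letter_pos[pos][0]): those where some orange position without a usable
-- letter_pos entry sits at a reachable depth of the search tree; B raises there identically.
def Pre_letter_pos_combinations_orange (orange_pos : List Int) (letter_pos : List (Int × List String)) (counter : List (String × Int)) : Prop :=
  (counter.map Prod.fst).Nodup ∧ (letter_pos.map Prod.fst).Nodup ∧
  ∀ d ∈ List.range orange_pos.length,
    pvInvalidL letter_pos (orange_pos.getD d 0) → ¬ pvReachL orange_pos letter_pos counter d
instance (orange_pos : List Int) (letter_pos : List (Int × List String)) (counter : List (String × Int)) : Decidable (Pre_letter_pos_combinations_orange orange_pos letter_pos counter) := by unfold Pre_letter_pos_combinations_orange pvInvalidL pvReachL; infer_instance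

def pvWitness_letter_pos_combinations_orange : List Int × (List (Int × List String)) × (List (String × Int)) :=
  ([0], [(0, ["a"])], [("b", 2)])

def Spec_letter_pos_combinations_orange (orange_pos : List Int) (letter_pos : List (Int × List String)) (counter : List (String × Int)) (out : List String) : Prop := out = letter_pos_combinations_orange_alt orange_pos letter_pos counter
instance (orange_pos : List Int) (letter_pos : List (Int × List String)) (counter : List (String × Int)) (out : List String) : Decidable (Spec_letter_pos_combinations_orange orange_pos letter_pos counter out) := by unfold Spec_letter_pos_combinations_orange; infer_instance

-- ===== CLAIM (what is proved, stated in full; the proofs are below) =====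
def Claim_equal_letter_pos_combinations_orange : Prop := ∀ (orange_pos : List Int) (letter_pos : List (Int × List String)) (counter : List (String × Int)), Dom_letter_pos_combinations_orange orange_pos letter_pos counter → Pre_letter_pos_combinations_orange orange_pos letter_pos counter → Spec_letter_pos_combinations_orange orange_pos letter_pos counter (letter_pos_combinations_orange orange_pos letter_pos counter)

-- ===== LEMMAS AND PROOFS =====

-- the positive-entry filter both programs apply (A eagerly, B at consumption time)
def pvPosF (l : List (String × Int)) : List (String × Int) := l.filter (fun p => decide (0 < p.2))

-- decrementing entry k to value w, as the map both Dict.insert and Dict.modify perform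
def pvG (k : String) (w : Int) (p : String × Int) : String × Int := if p.1 == k then (k, w) else p

lemma pvPosF_idem (l : List (String × Int)) : pvPosF (pvPosF l) = pvPosF l := by
  simp [pvPosF, List.filter_filter]

lemma pvG_id_of_not_mem (l : List (String × Int)) (k : String) (w : Int)
    (h : k ∉ l.map Prod.fst) : l.map (pvG k w) = l := by
  induction l with
  | nil => rfl
  | cons p rest ih =>
    simp only [List.map_cons, List.mem_cons, not_or] at h
    have hpk : (p.1 == k) = false := by
      simp only [beq_eq_false_iff_ne, ne_eq]
      intro he; exact h.1 he.symm
    simp only [List.map_cons, pvG, hpk, Bool.false_eq_true, if_false, ih h.2]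

lemma pvCore (cnt : List (String × Int)) (k : String) (v : Int)
    (hnd : (cnt.map Prod.fst).Nodup) (hmem : (k, v) ∈ cnt) (hv : 0 < v) :
    pvPosF (cnt.map (pvG k (v - 1))) = pvPosF ((pvPosF cnt).map (pvG k (v - 1))) := by
  induction cnt with
  | nil => cases hmem
  | cons p rest ih =>
    simp only [List.map_cons, List.nodup_cons] at hnd
    rcases List.mem_cons.1 hmem with hp | hrest
    · -- p = (k, v)
      subst hp
      have hrk : k ∉ rest.map Prod.fst := hnd.1
      have hfk : k ∉ (pvPosF rest).map Prod.fst := fun hx =>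
        hrk (List.Sublist.mem hx (List.Sublist.map Prod.fst (List.filter_sublist : List.Sublist (pvPosF rest) rest)))
      have h1 : rest.map (pvG k (v - 1)) = rest := pvG_id_of_not_mem _ _ _ hrk
      have h2 : (pvPosF rest).map (pvG k (v - 1)) = pvPosF rest := pvG_id_of_not_mem _ _ _ hfk
      have hself : ((k : String) == k) = true := by simp
      simp only [pvPosF, List.filter_cons, hv, decide_true, if_true, List.map_cons, pvG, hself,
        if_true] at *
      rw [h1, h2, List.filter_filter]
      simp
    · -- (k,v) ∈ rest, so p.1 ≠ k
      have hpk : (p.1 == k) = false := by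
        simp only [beq_eq_false_iff_ne, ne_eq]
        intro he
        exact hnd.1 (he ▸ List.mem_map.2 ⟨(k, v), hrest, rfl⟩)
      have hgp : pvG k (v - 1) p = p := by simp [pvG, hpk]
      have ih' := ih hnd.2 hrest
      by_cases hp2 : (0 : Int) < p.2
      · simp only [pvPosF, List.filter_cons, List.map_cons, hgp, hp2, decide_true, if_true] at ih' ⊢
        rw [ih']
      · simp only [pvPosF, List.filter_cons, List.map_cons, hgp, hp2, decide_false,
          Bool.false_eq_true, if_false] at ih' ⊢
        exact ih'

lemma pvInsert_items (cnt : List (String × Int)) (k : String) (v w : Int)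
    (hmem : (k, v) ∈ cnt) :
    ((PySem.Dict.mk cnt).insert k w).items = cnt.map (pvG k w) := by
  have hk : k ∈ (PySem.Dict.mk cnt).keys := by
    simp only [PySem.Dict.keys]
    exact List.mem_map.2 ⟨(k, v), hmem, rfl⟩
  have hc : (PySem.Dict.mk cnt).contains k = true := (PySem.Dict.contains_iff_mem_keys _ _).2 hk
  rw [PySem.Dict.items_insert_of_contains _ w hc]
  rfl

lemma pvGetD_mem (cnt : List (String × Int)) (k : String) (v : Int)
    (hnd : (cnt.map Prod.fst).Nodup) (hmem : (k, v) ∈ cnt) :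
    (PySem.Dict.mk cnt).getD k 0 = v :=
  PySem.Dict.getD_of_mem_items (d := PySem.Dict.mk cnt) hmem (by simpa [PySem.Dict.keys] using hnd) 0

lemma pvModify_items (cnt : List (String × Int)) (k : String) (v : Int)
    (hnd : (cnt.map Prod.fst).Nodup) (hmem : (k, v) ∈ cnt) :
    ((PySem.Dict.mk cnt).modify k 0 (· - 1)).items = cnt.map (pvG k (v - 1)) := by
  rw [PySem.Dict.modify, pvGetD_mem cnt k v hnd hmem, pvInsert_items cnt k v _ hmem]

lemma pvLoopB_nil (lp : PySem.Dict Int (List String)) (ps : List Int) :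
    pvLoopB lp ps [] = [] := by
  cases ps <;> simp [pvLoopB]

lemma pvStepB_append (g : String) (s t : List (List String × PySem.Dict String Int)) :
    pvStepB g (s ++ t) = pvStepB g s ++ pvStepB g t := by
  simp [pvStepB]

lemma pvLoopB_append (lp : PySem.Dict Int (List String)) (ps : List Int)
    (s t : List (List String × PySem.Dict String Int)) :
    pvLoopB lp ps (s ++ t) = pvLoopB lp ps s ++ pvLoopB lp ps t := by
  induction ps generalizing s t with
  | nil => simp [pvLoopB]
  | cons pos rest ih =>
    by_cases hs : s = []
    · subst hs; simp [pvLoopB_nil]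
    · by_cases ht : t = []
      · subst ht; simp [pvLoopB_nil]
      · have hst : ((s ++ t).isEmpty) = false := by
          simp [List.isEmpty_eq_false_iff, hs]
        simp only [pvLoopB, hst, List.isEmpty_eq_false_iff.2 hs, List.isEmpty_eq_false_iff.2 ht,
          Bool.false_eq_true, if_false, pvStepB_append]
        exact ih _ _

lemma pvLoopB_flatMap {α : Type} (lp : PySem.Dict Int (List String)) (ps : List Int)
    (l : List α) (h : α → List (List String × PySem.Dict String Int)) :
    pvLoopB lp ps (l.flatMap h) = l.flatMap (fun x => pvLoopB lp ps (h x)) := by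
  induction l with
  | nil => simp [pvLoopB_nil]
  | cons x xs ih => simp [List.flatMap_cons, pvLoopB_append, ih]

lemma pvOpmGet (xs : List Int) : ∀ (a d : Nat), d < xs.length →
    (PySem.Dict.mk (((List.range' a xs.length).map (fun n => (n : Int))).zip xs)).get?
      (((a + d : Nat) : Int)) = xs[d]? := by
  induction xs with
  | nil => intro a d h; simp at h
  | cons y ys ih =>
    intro a d h
    have hz : ((List.range' a (y :: ys).length).map (fun n => (n : Int))).zip (y :: ys)
        = ((a : Int), y) :: (((List.range' (a + 1) ys.length).map (fun n => (n : Int))).zip ys) := by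
      simp [List.range'_succ]
    rw [hz]
    cases d with
    | zero =>
      rw [PySem.Dict.get?_mk_cons]
      simp
    | succ d =>
      rw [PySem.Dict.get?_mk_cons]
      have hne : ((a : Int) == ((a + (d + 1) : Nat) : Int)) = false := by
        simp only [beq_eq_false_iff_ne, ne_eq]
        intro hc
        have := Int.ofNat.inj hc
        omega
      rw [hne]
      simp only [Bool.false_eq_true, if_false]
      have := ih (a + 1) d (by simpa using Nat.lt_of_succ_lt_succ h)
      rw [show ((a + 1) + d : Nat) = (a + (d + 1) : Nat) by omega] at this
      rw [this]
      simp

lemma pvG_keys (l : List (String × Int)) (k : String) (w : Int) :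
    (l.map (pvG k w)).map Prod.fst = l.map Prod.fst := by
  induction l with
  | nil => rfl
  | cons p rest ih =>
    have hh : (pvG k w p).1 = p.1 := by
      by_cases h : (p.1 == k) = true
      · simp [pvG, (eq_of_beq h).symm]
      · simp [pvG, h]
    simp [hh, ih]

lemma pvFlatMap_posF {α : Type} (l : List (String × Int)) (f : String × Int → List α)
    (h : ∀ p ∈ l, ¬ (0 : Int) < p.2 → f p = []) : l.flatMap f = (pvPosF l).flatMap f := by
  induction l with
  | nil => rfl
  | cons p rest ih =>
    have ih' := ih (fun q hq hn => h q (List.mem_cons_of_mem _ hq) hn)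
    by_cases hp : (0 : Int) < p.2
    · simp only [pvPosF, List.filter_cons, hp, decide_true, if_true, List.flatMap_cons]
      simp only [pvPosF] at ih'
      rw [ih']
    · simp only [pvPosF, List.filter_cons, hp, decide_false, Bool.false_eq_true, if_false,
        List.flatMap_cons]
      simp only [pvPosF] at ih'
      rw [h p (List.mem_cons_self ..) hp, List.nil_append, ih']

lemma pvFirst (lp : PySem.Dict Int (List String)) (opm : PySem.Dict Int Int)
    (maxd : Nat) (path : List String) (depth : Nat) (cnt : List (String × Int))
    (hnd : (cnt.map Prod.fst).Nodup) :
    pvBuildTree lp opm maxd path depth (PySem.Dict.mk cnt)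
      = pvBuildTree lp opm maxd path depth (PySem.Dict.mk (pvPosF cnt)) := by
  rw [pvBuildTree.eq_def, pvBuildTree.eq_def]
  split_ifs with h1 h2
  · rfl
  · rfl
  · dsimp only
    have hc : List.filter (fun p => decide (0 < p.2)) cnt = pvPosF cnt := rfl
    rw [hc, (show List.filter (fun p => decide (0 < p.2)) (pvPosF cnt) = pvPosF cnt from
      pvPosF_idem cnt)]
    refine List.flatMap_congr ?_
    intro p hp
    have hmf := List.mem_filter.1 (show p ∈ List.filter (fun q => decide (0 < q.2)) cnt from hp)
    have hp2 : (0 : Int) < p.2 := of_decide_eq_true hmf.2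
    have hmemc : (p.1, p.2) ∈ cnt := Prod.mk.eta.symm ▸ hmf.1
    have hmemf : (p.1, p.2) ∈ pvPosF cnt := Prod.mk.eta.symm ▸ hp
    have hndf : ((pvPosF cnt).map Prod.fst).Nodup :=
      List.Nodup.sublist (List.Sublist.map Prod.fst
        (List.filter_sublist : List.Sublist (pvPosF cnt) cnt)) hnd
    split_ifs with hg
    · rfl
    · rw [pvModify_items cnt p.1 p.2 hnd hmemc, pvModify_items (pvPosF cnt) p.1 p.2 hndf hmemf]
      have e1 : List.filter (fun q => decide (0 < q.2)) (cnt.map (pvG p.1 (p.2 - 1)))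
          = pvPosF (cnt.map (pvG p.1 (p.2 - 1))) := rfl
      have e2 : List.filter (fun q => decide (0 < q.2)) ((pvPosF cnt).map (pvG p.1 (p.2 - 1)))
          = pvPosF ((pvPosF cnt).map (pvG p.1 (p.2 - 1))) := rfl
      rw [e1, e2, pvCore cnt p.1 p.2 hnd hmemc hp2]

lemma pvMain (lp : List (Int × List String)) (op : List Int) :
    ∀ (ps : List Int) (depth : Nat) (path : List String) (cnt : List (String × Int)),
    op.drop depth = ps → depth + ps.length = op.length → (cnt.map Prod.fst).Nodup →
    (pvLoopB (PySem.Dict.mk lp) ps [(path, PySem.Dict.mk cnt)]).map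
        (fun st => PySem.Str.join "" st.1)
      = pvBuildTree (PySem.Dict.mk lp) (pvOpm op) op.length path depth
          (PySem.Dict.mk (pvPosF cnt)) := by
  intro ps
  induction ps with
  | nil =>
    intro depth path cnt _hdrop hlen _hnd
    have hlen' : depth = op.length := by simpa using hlen
    rw [pvLoopB, pvBuildTree.eq_def, dif_pos hlen']
    rfl
  | cons pos rest ih =>
    intro depth path cnt hdrop hlen hnd
    have hd : depth < op.length := by simp at hlen; omega
    have hdrop' : op.drop (depth + 1) = rest := by
      rw [← List.tail_drop, hdrop]
      rfl
    have hgetd : op[depth]? = some pos := by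
      have h0 : (op.drop depth)[0]? = op[depth + 0]? := List.getElem?_drop
      rw [hdrop] at h0
      simpa using h0.symm
    have hopm : (pvOpm op).get? ((depth : Nat) : Int) = some pos := by
      have hh := pvOpmGet op 0 depth hd
      rw [hgetd] at hh
      unfold pvOpm
      rw [List.range_eq_range']
      simpa using hh
    -- unfold one BFS level
    rw [pvLoopB]
    simp only [List.isEmpty_cons, Bool.false_eq_true, if_false]
    rw [show pvStepB ((((PySem.Dict.mk lp).get? pos).getD []).headD "")
          [(path, PySem.Dict.mk cnt)]
        = cnt.flatMap (fun p =>
            if 0 < p.2 ∧ p.1 ≠ (((PySem.Dict.mk lp).get? pos).getD []).headD ""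
            then [(path ++ [p.1], (PySem.Dict.mk cnt).insert p.1 (p.2 - 1))] else [])
      from by simp [pvStepB]]
    rw [pvFlatMap_posF _ _ (fun q _ hn => by simp [hn])]
    rw [pvLoopB_flatMap, List.map_flatMap]
    -- unfold one DFS level
    rw [pvBuildTree.eq_def, dif_neg (by omega : ¬ depth = op.length),
      dif_neg (by omega : ¬ op.length < depth)]
    dsimp only
    rw [hopm]
    simp only [Option.getD_some]
    rw [(show List.filter (fun p => decide (0 < p.2)) (pvPosF cnt) = pvPosF cnt from
      pvPosF_idem cnt)]
    refine List.flatMap_congr ?_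
    intro p hp
    have hmf := List.mem_filter.1 (show p ∈ List.filter (fun q => decide (0 < q.2)) cnt from hp)
    have hp2 : (0 : Int) < p.2 := of_decide_eq_true hmf.2
    have hmemc : (p.1, p.2) ∈ cnt := Prod.mk.eta.symm ▸ hmf.1
    have hmemf : (p.1, p.2) ∈ pvPosF cnt := Prod.mk.eta.symm ▸ hp
    have hndf : ((pvPosF cnt).map Prod.fst).Nodup :=
      List.Nodup.sublist (List.Sublist.map Prod.fst
        (List.filter_sublist : List.Sublist (pvPosF cnt) cnt)) hnd
    by_cases hg : p.1 = (((PySem.Dict.mk lp).get? pos).getD []).headD ""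
    · rw [if_neg (by simp [hg]), if_pos hg, pvLoopB_nil]
      rfl
    · rw [if_pos ⟨hp2, hg⟩, if_neg hg]
      have hD : (PySem.Dict.mk cnt).insert p.1 (p.2 - 1)
          = PySem.Dict.mk (cnt.map (pvG p.1 (p.2 - 1))) :=
        PySem.Dict.ext (pvInsert_items cnt p.1 p.2 (p.2 - 1) hmemc)
      rw [hD, ih (depth + 1) (path ++ [p.1]) (cnt.map (pvG p.1 (p.2 - 1))) hdrop'
        (by simp at hlen ⊢; omega) (by rw [pvG_keys]; exact hnd)]
      rw [pvModify_items (pvPosF cnt) p.1 p.2 hndf hmemf]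
      have e2 : List.filter (fun q => decide (0 < q.2)) ((pvPosF cnt).map (pvG p.1 (p.2 - 1)))
          = pvPosF ((pvPosF cnt).map (pvG p.1 (p.2 - 1))) := rfl
      rw [e2, ← pvCore cnt p.1 p.2 hnd hmemc hp2]

-- ===== VERDICT (by name: the statement is the Claim_ definition above) =====
theorem letter_pos_combinations_orange_spec : Claim_equal_letter_pos_combinations_orange := by
  intro op lp cnt _hdom hpre
  unfold Spec_letter_pos_combinations_orange
  unfold letter_pos_combinations_orange letter_pos_combinations_orange_alt
  rw [pvFirst _ _ _ _ _ _ hpre.1, ← pvMain lp op op 0 [] cnt rfl (by simp) hpre.1]
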